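-- pv_equiv track=rewrite | github.com/czxgmr4yhf-maker/DocFusion-AI | backend/app/api/match.py | build_matched_trace_map
-- ===== SOURCE A (Python) =====
-- def build_matched_trace_map(matched_result: dict, input_items: list):
--     """
--     给最终匹配结果补溯源信息：
--     标准字段名 -> 原始字段名/原始值/来源段落/原文
--     """
--     trace_map = {}
--
--     if not isinstance(matched_result, dict):
--         return trace_map
--
--     for std_field, matched_value in matched_result.items():
--         if matched_value in [None, ""]:
--             continue
--
--         target = str(matched_value).strip()
--         hit = None
--
--         # 先精确按 value 找
--         for item in input_items:
--             if str(item.get("value", "")).strip() == target: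
--                 hit = item
--                 break
--
--         # 再宽松匹配
--         if hit is None:
--             for item in input_items:
--                 item_value = str(item.get("value", "")).strip()
--                 if target and item_value and (target in item_value or item_value in target):
--                     hit = item
--                     break
--
--         if hit is not None:
--             trace_map[std_field] = {
--                 "source_key": hit.get("source_key"),
--                 "value": hit.get("value"),
--                 "source_paragraph": hit.get("source_paragraph"),
--                 "source_text": hit.get("source_text")
--             }
--         else:
--             trace_map[std_field] = {
--                 "source_key": None,
--                 "value": matched_value,
--                 "source_paragraph": None,
--                 "source_text": None
--             }
--
--     return trace_map
-- ===== SOURCE B (Python) =====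
-- def build_matched_trace_map(matched_result: dict, input_items: list):
--     """Single pass over input_items per field: track the first exact hit (break
--     immediately, it wins globally) and the first loose hit separately, then pick."""
--     trace_map = {}
--     if not isinstance(matched_result, dict):
--         return trace_map
--     for std_field, matched_value in matched_result.items():
--         if matched_value is None or matched_value == "":
--             continue
--         target = str(matched_value).strip()
--         exact = None
--         loose = None
--         for item in input_items:
--             item_value = str(item.get("value", "")).strip()
--             if item_value == target:
--                 exact = item
--                 break
--             if loose is None and target and item_value and (target in item_value or item_value in target):
--                 loose = item
--         hit = exact if exact is not None else loose
--         if hit is not None: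
--             trace_map[std_field] = {
--                 "source_key": hit.get("source_key"),
--                 "value": hit.get("value"),
--                 "source_paragraph": hit.get("source_paragraph"),
--                 "source_text": hit.get("source_text"),
--             }
--         else:
--             trace_map[std_field] = {
--                 "source_key": None,
--                 "value": matched_value,
--                 "source_paragraph": None,
--                 "source_text": None,
--             }
--     return trace_map
-- ===== Notes on version B (the rewrite author's own statement) =====
-- stated objective: alternative
-- what changed: The two separate scans of input_items per field (exact pass, then loose pass) are merged into one pass that breaks on the first exact hit while remembering the first loose hit, choosing exact over loose afterwards.
import Mathlib
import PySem

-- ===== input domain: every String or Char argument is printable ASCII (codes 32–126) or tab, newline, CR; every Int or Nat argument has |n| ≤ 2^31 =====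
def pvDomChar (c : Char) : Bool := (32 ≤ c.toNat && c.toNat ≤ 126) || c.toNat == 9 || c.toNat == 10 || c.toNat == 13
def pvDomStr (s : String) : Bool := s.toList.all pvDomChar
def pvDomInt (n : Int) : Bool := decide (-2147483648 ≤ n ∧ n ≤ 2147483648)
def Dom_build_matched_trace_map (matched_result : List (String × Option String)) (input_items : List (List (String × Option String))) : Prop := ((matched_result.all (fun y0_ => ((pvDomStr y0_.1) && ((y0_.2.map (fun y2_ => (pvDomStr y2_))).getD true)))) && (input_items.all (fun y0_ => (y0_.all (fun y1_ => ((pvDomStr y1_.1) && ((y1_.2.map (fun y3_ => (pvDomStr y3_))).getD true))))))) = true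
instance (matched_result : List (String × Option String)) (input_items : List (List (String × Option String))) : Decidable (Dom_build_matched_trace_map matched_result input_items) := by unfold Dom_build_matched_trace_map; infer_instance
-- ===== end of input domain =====

-- B merges A's two scans of input_items per field into one pass that breaks on the
-- first exact hit and remembers the first loose hit (objective: alternative decomposition).

-- ===== PORT A =====
-- Shared subexpressions of both Pythons.
-- str(item.get("value", "")).strip(): missing key → "", value None → "None" (Python str(None))
def pvItemValue (item : List (String × Option String)) : String :=
  PySem.Str.strip (match (PySem.Dict.ofList item).get? "value" with
    | some (some s) => s
    | some none => "None"
    | none => "")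

-- hit.get(k) : default None
def pvGetOpt (item : List (String × Option String)) (k : String) : Option String :=
  ((PySem.Dict.ofList item).get? k).join

def pvHitRecord (h : List (String × Option String)) : List (String × Option String) :=
  [("source_key", pvGetOpt h "source_key"), ("value", pvGetOpt h "value"),
   ("source_paragraph", pvGetOpt h "source_paragraph"), ("source_text", pvGetOpt h "source_text")]

def pvMissRecord (mv : String) : List (String × Option String) :=
  [("source_key", none), ("value", some mv), ("source_paragraph", none), ("source_text", none)]

-- the loose-match condition (identical in both Pythons)
def pvLooseP (target : String) (item : List (String × Option String)) : Bool :=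
  let iv := pvItemValue item
  (!(target == "")) && (!(iv == "")) && (PySem.Str.isIn target iv || PySem.Str.isIn iv target)

-- trace_map[std_field] = … : the keys produced by dict.items() are distinct, so each
-- dict assignment appends a fresh key; the trace_map dict is kept as its item list.
def build_matched_trace_map (matched_result : List (String × Option String)) (input_items : List (List (String × Option String))) : List (String × List (String × Option String)) :=
  (PySem.Dict.ofList matched_result).items.foldl (fun tm p =>
    match p.2 with
    | none => tm                               -- matched_value is None → continue
    | some mv =>
      if mv = "" then tm                       -- matched_value == "" → continue
      else
        let target := PySem.Str.strip mv
        -- first scan: exact match on stripped value, break at first hit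
        let hit := match input_items.find? (fun item => pvItemValue item == target) with
          | some h => some h
          -- second scan: loose bidirectional containment
          | none => input_items.find? (pvLooseP target)
        match hit with
        | some h => tm ++ [(p.1, pvHitRecord h)]
        | none => tm ++ [(p.1, pvMissRecord mv)]) []

-- ===== PORT B =====
-- single pass: break with the item on an exact hit; otherwise remember the first loose hit
def pvScanHit (target : String) (loose : Option (List (String × Option String))) : List (List (String × Option String)) → Option (List (String × Option String))
  | [] => loose
  | item :: rest =>
    let iv := pvItemValue item
    if iv == target then some item
    else pvScanHit target (if loose.isNone && pvLooseP target item then some item else loose) rest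

def pvAltGo (input_items : List (List (String × Option String))) : List (String × Option String) → List (String × List (String × Option String))
  | [] => []
  | (k, mv?) :: rest =>
    match mv? with
    | none => pvAltGo input_items rest
    | some mv =>
      if mv = "" then pvAltGo input_items rest
      else
        let target := PySem.Str.strip mv
        (match pvScanHit target none input_items with
         | some h => [(k, pvHitRecord h)]
         | none => [(k, pvMissRecord mv)]) ++ pvAltGo input_items rest

def build_matched_trace_map_alt (matched_result : List (String × Option String)) (input_items : List (List (String × Option String))) : List (String × List (String × Option String)) :=
  pvAltGo input_items (PySem.Dict.ofList matched_result).items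

-- ===== PRECONDITION & SPEC =====
def Spec_build_matched_trace_map (matched_result : List (String × Option String)) (input_items : List (List (String × Option String))) (out : List (String × List (String × Option String))) : Prop := out = build_matched_trace_map_alt matched_result input_items
instance (matched_result : List (String × Option String)) (input_items : List (List (String × Option String))) (out : List (String × List (String × Option String))) : Decidable (Spec_build_matched_trace_map matched_result input_items out) := by unfold Spec_build_matched_trace_map; infer_instance

-- ===== CLAIM (what is proved, stated in full; the proofs are below) =====
def Claim_equal_build_matched_trace_map : Prop := ∀ (matched_result : List (String × Option String)) (input_items : List (List (String × Option String))), Dom_build_matched_trace_map matched_result input_items → Spec_build_matched_trace_map matched_result input_items (build_matched_trace_map matched_result input_items)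

-- ===== LEMMAS AND PROOFS =====

-- the single pass returns the first exact hit if any, else the pending loose hit, else the first loose hit
theorem pvScanHit_eq (target : String) (loose : Option (List (String × Option String))) (ii : List (List (String × Option String))) :
    pvScanHit target loose ii =
      match ii.find? (fun item => pvItemValue item == target) with
      | some h => some h
      | none =>
        match loose with
        | some l => some l
        | none => ii.find? (pvLooseP target) := by
  induction ii generalizing loose with
  | nil => cases loose <;> simp [pvScanHit]
  | cons item rest ih =>
    by_cases hx : pvItemValue item == target
    · simp [pvScanHit, hx]
    · simp only [pvScanHit, hx, if_false, Bool.false_eq_true, List.find?_cons]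
      rw [ih]
      cases loose with
      | some l => simp
      | none =>
        by_cases hl : pvLooseP target item <;> simp [hl]

theorem pvAlt_go_eq (ii : List (List (String × Option String))) (l : List (String × Option String)) (acc : List (String × List (String × Option String))) :
    l.foldl (fun tm p =>
      match p.2 with
      | none => tm
      | some mv =>
        if mv = "" then tm
        else
          let target := PySem.Str.strip mv
          let hit := match ii.find? (fun item => pvItemValue item == target) with
            | some h => some h
            | none => ii.find? (pvLooseP target)
          match hit with
          | some h => tm ++ [(p.1, pvHitRecord h)]
          | none => tm ++ [(p.1, pvMissRecord mv)]) acc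
    = acc ++ pvAltGo ii l := by
  induction l generalizing acc with
  | nil => simp [pvAltGo]
  | cons p rest ih =>
    obtain ⟨k, mv?⟩ := p
    cases mv? with
    | none => simp [pvAltGo, ih]
    | some mv =>
      by_cases h0 : mv = ""
      · simp [pvAltGo, h0, ih]
      · simp only [pvAltGo, h0, if_false, List.foldl_cons]
        rw [pvScanHit_eq]
        cases hf : ii.find? (fun item => pvItemValue item == PySem.Str.strip mv) with
        | some h => simp [ih]
        | none =>
          cases hg : ii.find? (pvLooseP (PySem.Str.strip mv)) with
          | some h => simp [ih]
          | none => simp [ih]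

-- ===== VERDICT (by name: the statement is the Claim_ definition above) =====
theorem build_matched_trace_map_spec : Claim_equal_build_matched_trace_map := by
  intro mr ii _
  show build_matched_trace_map mr ii = build_matched_trace_map_alt mr ii
  unfold build_matched_trace_map build_matched_trace_map_alt
  rw [pvAlt_go_eq]
  simp
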